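-- pv_equiv track=rewrite | github.com/RokPre/informacija-in-kodi | izbirna/my_qoi.py | decode_RGB
-- ===== SOURCE A (Python) =====
-- def decode_RGB(data, height, width):
--     output_list = [[[0, 0, 0] for _ in range(width)] for _ in range(height)]
--     prev_pixel: list[int] = [0, 0, 0]
--     running_list: list[list[int]] = [[0, 0, 0] for _ in range(64)]
--
--     byte_index = 0
--     run_length = 0
--     for h in range(height):
--         for w in range(width):
--             # pixel = [blue, green, red]
--
--             # Run
--             if run_length > 0:
--                 run_length -= 1
--                 pixel = prev_pixel.copy()
--                 output_list[h][w] = pixel.copy()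
--
--                 color_hash = (pixel[2] * 3 + pixel[1] * 5 + pixel[0] * 7 + 255 * 11) % 64
--                 running_list[color_hash] = pixel.copy()
--                 continue
--
--             # Unique
--             if data[byte_index] == 0b11111110:
--                 pixel = [data[byte_index + i] for i in range(3, 0, -1)]
--                 output_list[h][w] = pixel.copy()
--
--                 color_hash = (pixel[2] * 3 + pixel[1] * 5 + pixel[0] * 7 + 255 * 11) % 64
--                 running_list[color_hash] = pixel.copy()
--                 prev_pixel = pixel.copy()
--                 byte_index = byte_index + 4
--                 continue
--
--             tag = data[byte_index] & 0b11000000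
--             # Index
--             if tag == 0b00000000:
--                 pixel = running_list[data[byte_index] & 0b00111111]
--                 output_list[h][w] = pixel.copy()
--
--                 prev_pixel = pixel.copy()
--                 byte_index += 1
--                 continue
--
--             # Diff
--             if tag == 0b01000000:
--                 # pixel = [prev_pixel[i] + ((data[byte_index] >> (2 * i)) & 0b11) - 2 for i in range(0, 3)]
--                 r = prev_pixel[2] + ((data[byte_index] >> 4) & 0b11) - 2
--                 g = prev_pixel[1] + ((data[byte_index] >> 2) & 0b11) - 2
--                 b = prev_pixel[0] + ((data[byte_index] >> 0) & 0b11) - 2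
--                 pixel = [b, g, r]
--                 output_list[h][w] = pixel.copy()
--
--                 color_hash = (pixel[2] * 3 + pixel[1] * 5 + pixel[0] * 7 + 255 * 11) % 64
--                 running_list[color_hash] = pixel.copy()
--                 prev_pixel = pixel.copy()
--                 byte_index += 1
--                 continue
--
--             # Luma
--             if tag == 0b10000000:
--                 dg = (data[byte_index] & 0b00111111) - 32
--
--                 byte_index += 1
--
--                 drdg = ((data[byte_index] >> 4) & 0b00001111) - 8
--                 dbdg = ((data[byte_index] >> 0) & 0b00001111) - 8
--                 dr = drdg + dg
--                 db = dbdg + dg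
--
--                 pixel = [(prev_pixel[0] + db) & 0xFF, (prev_pixel[1] + dg) & 0xFF, (prev_pixel[2] + dr) & 0xFF]
--                 output_list[h][w] = pixel.copy()
--
--                 color_hash = (pixel[2] * 3 + pixel[1] * 5 + pixel[0] * 7 + 255 * 11) % 64
--                 running_list[color_hash] = pixel.copy()
--                 prev_pixel = pixel.copy()
--                 byte_index += 1
--                 continue
--
--             # RUN start
--             if tag == 0b11000000:
--                 run_length = data[byte_index] & 0b00111111
--                 pixel = prev_pixel.copy()
--                 output_list[h][w] = pixel
--
--                 color_hash = (pixel[2] * 3 + pixel[1] * 5 + pixel[0] * 7 + 255 * 11) % 64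
--                 running_list[color_hash] = pixel.copy()
--                 prev_pixel = pixel.copy()
--                 byte_index += 1
--                 continue
--
--     return output_list
-- ===== SOURCE B (Python) =====
-- def decode_RGB(data, height, width):
--     n = (height if height > 0 else 0) * (width if width > 0 else 0)
--
--     # Phase 1: tokenize the byte stream into decode ops until enough pixels are promised.
--     ops = []
--     promised = 0
--     i = 0
--     while promised < n:
--         b0 = data[i]
--         if b0 == 0xFE:
--             ops.append(("rgb", (data[i + 3], data[i + 2], data[i + 1])))
--             i += 4
--             promised += 1
--         else:
--             tag = b0 & 0xC0
--             if tag == 0x00: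
--                 ops.append(("idx", b0 & 0x3F))
--                 i += 1
--                 promised += 1
--             elif tag == 0x40:
--                 ops.append(("diff", ((b0 & 3) - 2, ((b0 >> 2) & 3) - 2, ((b0 >> 4) & 3) - 2)))
--                 i += 1
--                 promised += 1
--             elif tag == 0x80:
--                 b1 = data[i + 1]
--                 ops.append(("luma", ((b0 & 0x3F) - 32, ((b1 >> 4) & 15) - 8, (b1 & 15) - 8)))
--                 i += 2
--                 promised += 1
--             else:
--                 cnt = (b0 & 0x3F) + 1
--                 ops.append(("run", cnt))
--                 i += 1
--                 promised += cnt
--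
--     # Phase 2: evaluate the ops into a flat sequence of (b, g, r) triples.
--     pixels = []
--     prev = (0, 0, 0)
--     cache = [(0, 0, 0)] * 64
--     for op, arg in ops:
--         if op == "idx":
--             prev = cache[arg]
--             pixels.append(prev)
--             continue
--         if op == "rgb":
--             px = arg
--         elif op == "diff":
--             db, dg, dr = arg
--             px = (prev[0] + db, prev[1] + dg, prev[2] + dr)
--         elif op == "luma":
--             dg, drdg, dbdg = arg
--             px = ((prev[0] + dbdg + dg) & 0xFF, (prev[1] + dg) & 0xFF, (prev[2] + drdg + dg) & 0xFF)
--         else:  # run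
--             px = prev
--         cache[(px[2] * 3 + px[1] * 5 + px[0] * 7 + 255 * 11) % 64] = px
--         prev = px
--         if op == "run":
--             pixels.extend([px] * arg)
--         else:
--             pixels.append(px)
--
--     flat = pixels[:n]
--     return [[list(p) for p in flat[r * width:(r + 1) * width]] for r in range(height)]
-- ===== Notes on version B (the rewrite author's own statement) =====
-- stated objective: alternative
-- what changed: Replaces A's coordinate-driven nested h/w loop with persistent run_length state by a two-phase decoder: a tokenizer that parses the byte stream into a list of ops (rgb/idx/diff/luma/run with pre-extracted deltas), then an evaluator that folds the ops into a flat list of (b,g,r) tuples (emitting a whole run at once), truncates it and reshapes it into rows.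
import Mathlib
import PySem

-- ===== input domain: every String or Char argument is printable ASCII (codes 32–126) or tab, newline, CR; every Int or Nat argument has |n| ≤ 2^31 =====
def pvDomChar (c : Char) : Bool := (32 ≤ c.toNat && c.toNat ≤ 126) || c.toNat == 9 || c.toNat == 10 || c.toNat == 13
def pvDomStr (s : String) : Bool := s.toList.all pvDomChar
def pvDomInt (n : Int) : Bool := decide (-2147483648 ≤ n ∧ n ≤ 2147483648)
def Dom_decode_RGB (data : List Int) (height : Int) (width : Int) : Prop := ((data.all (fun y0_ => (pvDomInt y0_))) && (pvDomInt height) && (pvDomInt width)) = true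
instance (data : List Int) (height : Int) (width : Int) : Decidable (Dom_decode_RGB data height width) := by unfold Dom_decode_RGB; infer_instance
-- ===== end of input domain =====

-- B replaces A's coordinate-driven nested h/w loop (with persistent run_length state) by a
-- two-phase decoder: tokenize the byte stream into a list of ops, then evaluate the ops into a
-- flat list of (b,g,r) triples (a run emitted at once) and reshape into rows; same cost,
-- alternative decomposition.

-- ===== PORT A =====
-- A's loop body for one grid position (h, w); state is (output_list, prev_pixel, running_list, byte_index, run_length).
def pvBodyA (data : List Int)
    (st : List (List (List Int)) × List Int × List (List Int) × Int × Int) (h w : Int) :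
    List (List (List Int)) × List Int × List (List Int) × Int × Int :=
  match st with
  | (output, prev, running, bi, rl) =>
    if 0 < rl then
      let pixel := prev
      let output := output.set h.toNat ((output.getD h.toNat []).set w.toNat pixel)
      let ch := PySem.Int.mod (pixel.getD 2 0 * 3 + pixel.getD 1 0 * 5 + pixel.getD 0 0 * 7 + 255 * 11) 64
      (output, prev, running.set ch.toNat pixel, bi, rl - 1)
    else if PySem.List.pyGetD data bi 0 = 254 then
      let pixel := [PySem.List.pyGetD data (bi + 3) 0, PySem.List.pyGetD data (bi + 2) 0,
        PySem.List.pyGetD data (bi + 1) 0]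
      let output := output.set h.toNat ((output.getD h.toNat []).set w.toNat pixel)
      let ch := PySem.Int.mod (pixel.getD 2 0 * 3 + pixel.getD 1 0 * 5 + pixel.getD 0 0 * 7 + 255 * 11) 64
      (output, pixel, running.set ch.toNat pixel, bi + 4, rl)
    else
      let tag := PySem.Int.band (PySem.List.pyGetD data bi 0) 192
      if tag = 0 then
        let pixel := running.getD (PySem.Int.band (PySem.List.pyGetD data bi 0) 63).toNat []
        let output := output.set h.toNat ((output.getD h.toNat []).set w.toNat pixel)
        (output, pixel, running, bi + 1, rl)
      else if tag = 64 then
        let d := PySem.List.pyGetD data bi 0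
        let r := prev.getD 2 0 + PySem.Int.band (d >>> (4 : Nat)) 3 - 2
        let g := prev.getD 1 0 + PySem.Int.band (d >>> (2 : Nat)) 3 - 2
        let b := prev.getD 0 0 + PySem.Int.band (d >>> (0 : Nat)) 3 - 2
        let pixel := [b, g, r]
        let output := output.set h.toNat ((output.getD h.toNat []).set w.toNat pixel)
        let ch := PySem.Int.mod (pixel.getD 2 0 * 3 + pixel.getD 1 0 * 5 + pixel.getD 0 0 * 7 + 255 * 11) 64
        (output, pixel, running.set ch.toNat pixel, bi + 1, rl)
      else if tag = 128 then
        let dg := PySem.Int.band (PySem.List.pyGetD data bi 0) 63 - 32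
        let bi := bi + 1
        let b1 := PySem.List.pyGetD data bi 0
        let drdg := PySem.Int.band (b1 >>> (4 : Nat)) 15 - 8
        let dbdg := PySem.Int.band (b1 >>> (0 : Nat)) 15 - 8
        let dr := drdg + dg
        let db := dbdg + dg
        let pixel := [PySem.Int.band (prev.getD 0 0 + db) 255, PySem.Int.band (prev.getD 1 0 + dg) 255,
          PySem.Int.band (prev.getD 2 0 + dr) 255]
        let output := output.set h.toNat ((output.getD h.toNat []).set w.toNat pixel)
        let ch := PySem.Int.mod (pixel.getD 2 0 * 3 + pixel.getD 1 0 * 5 + pixel.getD 0 0 * 7 + 255 * 11) 64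
        (output, pixel, running.set ch.toNat pixel, bi + 1, rl)
      else if tag = 192 then
        let rl := PySem.Int.band (PySem.List.pyGetD data bi 0) 63
        let pixel := prev
        let output := output.set h.toNat ((output.getD h.toNat []).set w.toNat pixel)
        let ch := PySem.Int.mod (pixel.getD 2 0 * 3 + pixel.getD 1 0 * 5 + pixel.getD 0 0 * 7 + 255 * 11) 64
        (output, pixel, running.set ch.toNat pixel, bi + 1, rl)
      else
        -- Python's loop body falls through without writing (unreachable: tag ∈ {0,64,128,192})
        (output, prev, running, bi, rl)

def decode_RGB (data : List Int) (height : Int) (width : Int) : List (List (List Int)) :=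
  let output0 := (PySem.List.pyRange 0 height).map
    (fun _ => (PySem.List.pyRange 0 width).map (fun _ => ([0, 0, 0] : List Int)))
  let final := (PySem.List.pyRange 0 height).foldl
    (fun st h => (PySem.List.pyRange 0 width).foldl (fun st w => pvBodyA data st h w) st)
    (output0, ([0, 0, 0] : List Int), List.replicate 64 ([0, 0, 0] : List Int), (0 : Int), (0 : Int))
  final.1

-- ===== PORT B =====
-- Source B phase 1 produces op tuples ("rgb", …) | ("idx", k) | ("diff", …) | ("luma", …) | ("run", cnt);
-- ported as an inductive (idx / run arguments are b0 & 63 (+1), always in [0, 64], kept as Nat — exact).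
inductive PvOp
  | rgb : Int → Int → Int → PvOp
  | idx : Nat → PvOp
  | diff : Int → Int → Int → PvOp
  | luma : Int → Int → Int → PvOp
  | run : Nat → PvOp

-- Source B's tokenizer while loop (state: promised pixel count, byte position); totalised with a
-- structural fuel argument (each iteration promises at least one pixel, so fuel = n suffices)
def pvTok (data : List Int) (fuel : Nat) (n : Nat) (promised : Nat) (i : Int) : List PvOp :=
  match fuel with
  | 0 => []
  | fuel + 1 =>
  if promised < n then
    let b0 := PySem.List.pyGetD data i 0
    if b0 = 254 then
      PvOp.rgb (PySem.List.pyGetD data (i + 3) 0) (PySem.List.pyGetD data (i + 2) 0)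
          (PySem.List.pyGetD data (i + 1) 0) ::
        pvTok data fuel n (promised + 1) (i + 4)
    else
      let tag := PySem.Int.band b0 192
      if tag = 0 then
        PvOp.idx (PySem.Int.band b0 63).toNat :: pvTok data fuel n (promised + 1) (i + 1)
      else if tag = 64 then
        PvOp.diff (PySem.Int.band b0 3 - 2) (PySem.Int.band (b0 >>> (2 : Nat)) 3 - 2)
            (PySem.Int.band (b0 >>> (4 : Nat)) 3 - 2) ::
          pvTok data fuel n (promised + 1) (i + 1)
      else if tag = 128 then
        let b1 := PySem.List.pyGetD data (i + 1) 0
        PvOp.luma (PySem.Int.band b0 63 - 32) (PySem.Int.band (b1 >>> (4 : Nat)) 15 - 8)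
            (PySem.Int.band b1 15 - 8) ::
          pvTok data fuel n (promised + 1) (i + 2)
      else
        let cnt := (PySem.Int.band b0 63).toNat + 1
        PvOp.run cnt :: pvTok data fuel n (promised + cnt) (i + 1)
  else []

-- Source B phase 2: the pixel an op decodes from prev (idx is handled separately; run keeps prev)
def pvPx (op : PvOp) (prev : Int × Int × Int) : Int × Int × Int :=
  match op with
  | .rgb b g r => (b, g, r)
  | .diff db dg dr => (prev.1 + db, prev.2.1 + dg, prev.2.2 + dr)
  | .luma dg drdg dbdg =>
      (PySem.Int.band (prev.1 + dbdg + dg) 255, PySem.Int.band (prev.2.1 + dg) 255,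
        PySem.Int.band (prev.2.2 + drdg + dg) 255)
  | _ => prev

-- pixels.extend([px] * arg) for a run, pixels.append(px) otherwise
def pvEmit (op : PvOp) (px : Int × Int × Int) : List (Int × Int × Int) :=
  match op with
  | .run cnt => List.replicate cnt px
  | _ => [px]

def pvCHash (px : Int × Int × Int) : Nat :=
  (PySem.Int.mod (px.2.2 * 3 + px.2.1 * 5 + px.1 * 7 + 255 * 11) 64).toNat

-- Source B's evaluator for loop (state: prev, cache of 64 triples), emitting the flat pixel list
def pvEval : List PvOp → (Int × Int × Int) → List (Int × Int × Int) → List (Int × Int × Int)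
  | [], _, _ => []
  | op :: ops, prev, cache =>
    match op with
    | .idx k =>
        let px := cache.getD k (0, 0, 0)
        px :: pvEval ops px cache
    | _ =>
        let px := pvPx op prev
        pvEmit op px ++ pvEval ops px (cache.set (pvCHash px) px)

def decode_RGB_alt (data : List Int) (height : Int) (width : Int) : List (List (List Int)) :=
  let n := height.toNat * width.toNat   -- (height if height > 0 else 0) * (width if width > 0 else 0)
  let ops := pvTok data n n 0 0
  let flat := (pvEval ops (0, 0, 0) (List.replicate 64 ((0, 0, 0) : Int × Int × Int))).take n
  (PySem.List.pyRange 0 height).map (fun r =>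
    (PySem.List.slice flat (some (r * width)) (some ((r + 1) * width))).map
      (fun p => [p.1, p.2.1, p.2.2]))

-- ===== PRECONDITION & SPEC =====
-- Number of pixels the stream's complete chunks promise: a structural parse of the input that only
-- measures chunk lengths (1, 2 or 4 bytes; a run chunk promises (b & 63) + 1 pixels), no decoding.
def pvChunkPixels : List Int → Nat
  | [] => 0
  | b :: rest =>
    if b = 254 then
      match rest with
      | _ :: _ :: _ :: r => 1 + pvChunkPixels r
      | _ => 0
    else if PySem.Int.band b 192 = 128 then
      match rest with
      | _ :: r => 1 + pvChunkPixels r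
      | [] => 0
    else if PySem.Int.band b 192 = 192 then
      (PySem.Int.band b 63).toNat + 1 + pvChunkPixels rest
    else 1 + pvChunkPixels rest

-- Pre_ excludes exactly the inputs on which Python A raises IndexError: the byte stream's complete
-- chunks promise fewer than height*width pixels, so A reads past the end of data mid-decode.
def Pre_decode_RGB (data : List Int) (height : Int) (width : Int) : Prop :=
  height.toNat * width.toNat ≤ pvChunkPixels data
instance (data : List Int) (height : Int) (width : Int) : Decidable (Pre_decode_RGB data height width) := by
  unfold Pre_decode_RGB; infer_instance

def pvWitness_decode_RGB : List Int × Int × Int := ([197], 2, 3)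

def Spec_decode_RGB (data : List Int) (height : Int) (width : Int) (out : List (List (List Int))) : Prop :=
  out = decode_RGB_alt data height width
instance (data : List Int) (height : Int) (width : Int) (out : List (List (List Int))) : Decidable (Spec_decode_RGB data height width out) := by
  unfold Spec_decode_RGB; infer_instance

-- ===== CLAIM (what is proved, stated in full; the proofs are below) =====
def Claim_equal_decode_RGB : Prop := ∀ (data : List Int) (height : Int) (width : Int),
  Dom_decode_RGB data height width → Pre_decode_RGB data height width →
  Spec_decode_RGB data height width (decode_RGB data height width)

-- ===== LEMMAS AND PROOFS =====

-- one abstract decode step on the grid-free state (prev_pixel, running_list, byte_index, run_length):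
-- returns (emitted pixel, next state)
def pvStep (data : List Int) (st : List Int × List (List Int) × Int × Int) :
    List Int × (List Int × List (List Int) × Int × Int) :=
  match st with
  | (prev, running, bi, rl) =>
    if 0 < rl then
      let ch := PySem.Int.mod (prev.getD 2 0 * 3 + prev.getD 1 0 * 5 + prev.getD 0 0 * 7 + 255 * 11) 64
      (prev, (prev, running.set ch.toNat prev, bi, rl - 1))
    else if PySem.List.pyGetD data bi 0 = 254 then
      let pixel := [PySem.List.pyGetD data (bi + 3) 0, PySem.List.pyGetD data (bi + 2) 0,
        PySem.List.pyGetD data (bi + 1) 0]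
      let ch := PySem.Int.mod (pixel.getD 2 0 * 3 + pixel.getD 1 0 * 5 + pixel.getD 0 0 * 7 + 255 * 11) 64
      (pixel, (pixel, running.set ch.toNat pixel, bi + 4, rl))
    else if PySem.Int.band (PySem.List.pyGetD data bi 0) 192 = 0 then
      let pixel := running.getD (PySem.Int.band (PySem.List.pyGetD data bi 0) 63).toNat []
      (pixel, (pixel, running, bi + 1, rl))
    else if PySem.Int.band (PySem.List.pyGetD data bi 0) 192 = 64 then
      let d := PySem.List.pyGetD data bi 0
      let r := prev.getD 2 0 + PySem.Int.band (d >>> (4 : Nat)) 3 - 2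
      let g := prev.getD 1 0 + PySem.Int.band (d >>> (2 : Nat)) 3 - 2
      let b := prev.getD 0 0 + PySem.Int.band (d >>> (0 : Nat)) 3 - 2
      let pixel := [b, g, r]
      let ch := PySem.Int.mod (pixel.getD 2 0 * 3 + pixel.getD 1 0 * 5 + pixel.getD 0 0 * 7 + 255 * 11) 64
      (pixel, (pixel, running.set ch.toNat pixel, bi + 1, rl))
    else if PySem.Int.band (PySem.List.pyGetD data bi 0) 192 = 128 then
      let dg := PySem.Int.band (PySem.List.pyGetD data bi 0) 63 - 32
      let b1 := PySem.List.pyGetD data (bi + 1) 0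
      let dr := (PySem.Int.band (b1 >>> (4 : Nat)) 15 - 8) + dg
      let db := (PySem.Int.band (b1 >>> (0 : Nat)) 15 - 8) + dg
      let pixel := [PySem.Int.band (prev.getD 0 0 + db) 255, PySem.Int.band (prev.getD 1 0 + dg) 255,
        PySem.Int.band (prev.getD 2 0 + dr) 255]
      let ch := PySem.Int.mod (pixel.getD 2 0 * 3 + pixel.getD 1 0 * 5 + pixel.getD 0 0 * 7 + 255 * 11) 64
      (pixel, (pixel, running.set ch.toNat pixel, bi + 1 + 1, rl))
    else
      let rl' := PySem.Int.band (PySem.List.pyGetD data bi 0) 63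
      let ch := PySem.Int.mod (prev.getD 2 0 * 3 + prev.getD 1 0 * 5 + prev.getD 0 0 * 7 + 255 * 11) 64
      (prev, (prev, running.set ch.toNat prev, bi + 1, rl'))

def pvFlat (data : List Int) : Nat → (List Int × List (List Int) × Int × Int) → List (List Int)
  | 0, _ => []
  | n + 1, st => (pvStep data st).1 :: pvFlat data n (pvStep data st).2

def pvIter (data : List Int) : Nat → (List Int × List (List Int) × Int × Int) →
    (List Int × List (List Int) × Int × Int)
  | 0, st => st
  | n + 1, st => pvIter data n (pvStep data st).2

def pvChunk (data : List Int) (W : Nat) : Nat → (List Int × List (List Int) × Int × Int) →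
    List (List (List Int))
  | 0, _ => []
  | c + 1, st => pvFlat data W st :: pvChunk data W c (pvIter data W st)

lemma pvNatAnd192 (m : Nat) : m &&& 192 = 0 ∨ m &&& 192 = 64 ∨ m &&& 192 = 128 ∨ m &&& 192 = 192 := by
  have h : (192 : Nat) = 2 ^ 7 ||| 2 ^ 6 := by decide
  rw [h, Nat.and_or_distrib_left, Nat.and_two_pow, Nat.and_two_pow]
  rcases m.testBit 7 <;> rcases m.testBit 6 <;> simp

lemma pvBand192 (d : Int) : PySem.Int.band d 192 = 0 ∨ PySem.Int.band d 192 = 64 ∨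
    PySem.Int.band d 192 = 128 ∨ PySem.Int.band d 192 = 192 := by
  by_cases hd : 0 ≤ d
  · rw [PySem.Int.band_of_nonneg hd (by norm_num)]
    rcases pvNatAnd192 d.toNat with h | h | h | h <;> simp [h]
  · have : PySem.Int.band d 192 = ((192 : Nat) - ((192 : Nat) &&& (-d - 1).toNat) : Nat) := by
      simp only [PySem.Int.band]
      rw [if_neg hd, if_pos (by norm_num : (0 : Int) ≤ 192)]
      norm_num
      rfl
    rw [this]
    rcases pvNatAnd192 (-d - 1).toNat with h | h | h | h <;>
      rw [Nat.and_comm] at h <;> rw [h] <;> simp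

lemma pvBand63_lt (d : Int) : (PySem.Int.band d 63).toNat < 64 := by
  by_cases hd : 0 ≤ d
  · rw [PySem.Int.band_of_nonneg hd (by norm_num)]
    have h : d.toNat &&& (63 : Int).toNat ≤ 63 := by
      have h63 : (63 : Int).toNat = 63 := rfl
      rw [h63]; exact Nat.and_le_right
    omega
  · have : PySem.Int.band d 63 = ((63 : Nat) - ((63 : Nat) &&& (-d - 1).toNat) : Nat) := by
      simp only [PySem.Int.band]
      rw [if_neg hd, if_pos (by norm_num : (0 : Int) ≤ 63)]
      norm_num
      rfl
    rw [this]
    omega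

def pvIterC (data : List Int) (W : Nat) : Nat → (List Int × List (List Int) × Int × Int) →
    (List Int × List (List Int) × Int × Int)
  | 0, st => st
  | c + 1, st => pvIterC data W c (pvIter data W st)

-- one row-level fill step: write the next decoded pixel at index w of the current row
def pvRowF (data : List Int) (st : List (List Int) × List Int × List (List Int) × Int × Int)
    (w : Int) : List (List Int) × List Int × List (List Int) × Int × Int :=
  match st with
  | (row, s) => (row.set w.toNat (pvStep data s).1, (pvStep data s).2)

lemma pvPyRange (h : Int) : PySem.List.pyRange 0 h = (List.range h.toNat).map (fun (k : Nat) => (k : Int)) := by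
  by_cases hh : 0 ≤ h
  · conv_lhs => rw [← Int.toNat_of_nonneg hh]
    rw [PySem.List.pyRange_zero_natCast]
  · have h1 : h.toNat = 0 := by omega
    rw [h1]
    simp [PySem.List.pyRange]
    omega

lemma pvFlat_length (data : List Int) (n : Nat) (st : List Int × List (List Int) × Int × Int) :
    (pvFlat data n st).length = n := by
  induction n generalizing st with
  | zero => rfl
  | succ n ih => simp [pvFlat, ih]

lemma pvBodyA_eq (data : List Int) (g : List (List (List Int)))
    (s : List Int × List (List Int) × Int × Int) (h w : Int) :
    pvBodyA data (g, s) h w =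
      (g.set h.toNat ((g.getD h.toNat []).set w.toNat (pvStep data s).1), (pvStep data s).2) := by
  obtain ⟨prev, running, bi, rl⟩ := s
  simp only [pvBodyA, pvStep]
  split_ifs with h1 h2 h3 h4 h5 h6 <;> try rfl
  rcases pvBand192 (PySem.List.pyGetD data bi 0) with hb | hb | hb | hb
  · exact absurd hb h3
  · exact absurd hb h4
  · exact absurd hb h5
  · exact absurd hb h6

lemma pvInner_fold (data : List Int) (ws : List Int) :
    ∀ (g : List (List (List Int))) (s : List Int × List (List Int) × Int × Int) (h : Int),
    h.toNat < g.length →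
    ws.foldl (fun st w => pvBodyA data st h w) (g, s) =
      (g.set h.toNat (ws.foldl (pvRowF data) (g.getD h.toNat [], s)).1,
       (ws.foldl (pvRowF data) (g.getD h.toNat [], s)).2) := by
  induction ws with
  | nil =>
    intro g s h hh
    simp only [List.foldl_nil]
    rw [List.getD_eq_getElem?_getD, List.getElem?_eq_getElem hh]
    simp
  | cons w ws ih =>
    intro g s h hh
    simp only [List.foldl_cons]
    rw [pvBodyA_eq]
    rw [ih _ _ h (by simpa using hh)]
    have hget : (g.set h.toNat ((g.getD h.toNat []).set w.toNat (pvStep data s).1)).getD h.toNat [] =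
        (g.getD h.toNat []).set w.toNat (pvStep data s).1 := by
      rw [List.getD_eq_getElem?_getD, List.getElem?_set_self hh]
      simp
    rw [hget, List.set_set]
    rfl

lemma pvRow_fill (data : List Int) :
    ∀ (cnt : Nat) (pre rest : List (List Int)) (s : List Int × List (List Int) × Int × Int),
    rest.length = cnt →
    ((List.range' pre.length cnt).map (fun (k : Nat) => (k : Int))).foldl (pvRowF data) (pre ++ rest, s) =
      (pre ++ pvFlat data cnt s, pvIter data cnt s) := by
  intro cnt
  induction cnt with
  | zero =>
    intro pre rest s hr
    rw [List.length_eq_zero_iff.mp hr]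
    simp [pvFlat, pvIter]
  | succ cnt ih =>
    intro pre rest s hr
    rcases rest with _ | ⟨x, rest⟩
    · exact absurd hr (by simp)
    · rw [List.range'_succ]
      simp only [List.map_cons, List.foldl_cons]
      have hstep : pvRowF data (pre ++ x :: rest, s) (pre.length : Int) =
          ((pre ++ [(pvStep data s).1]) ++ rest, (pvStep data s).2) := by
        simp [pvRowF]
      rw [hstep]
      have hlen : (pre ++ [(pvStep data s).1]).length = pre.length + 1 := by simp
      rw [← hlen, ih _ rest _ (by simpa using hr)]
      simp [pvFlat, pvIter]

lemma pvOuter_fill (data : List Int) (width : Int) :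
    ∀ (cnt : Nat) (pre : List (List (List Int))) (s : List Int × List (List Int) × Int × Int),
    ((List.range' pre.length cnt).map (fun (k : Nat) => (k : Int))).foldl
      (fun st h => (PySem.List.pyRange 0 width).foldl (fun st w => pvBodyA data st h w) st)
      (pre ++ List.replicate cnt ((PySem.List.pyRange 0 width).map (fun _ => ([0, 0, 0] : List Int))), s) =
      (pre ++ pvChunk data width.toNat cnt s, pvIterC data width.toNat cnt s) := by
  intro cnt
  induction cnt with
  | zero => intro pre s; simp [pvChunk, pvIterC]
  | succ cnt ih =>
    intro pre s
    rw [List.range'_succ, List.replicate_succ]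
    simp only [List.map_cons, List.foldl_cons]
    set initRow := (PySem.List.pyRange 0 width).map (fun _ => ([0, 0, 0] : List Int)) with hinit
    have hrowlen : initRow.length = width.toNat := by
      rw [hinit, List.length_map, pvPyRange, List.length_map, List.length_range]
    have hglen : (pre.length : Int).toNat < (pre ++ initRow :: List.replicate cnt initRow).length := by
      simp
    rw [pvInner_fold data _ _ _ _ hglen]
    have hget : (pre ++ initRow :: List.replicate cnt initRow).getD (pre.length : Int).toNat [] = initRow := by
      simp [List.getD_eq_getElem?_getD]
    rw [hget]
    have hrows : (PySem.List.pyRange 0 width).foldl (pvRowF data) (initRow, s) =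
        (pvFlat data width.toNat s, pvIter data width.toNat s) := by
      have := pvRow_fill data width.toNat [] initRow s hrowlen
      simpa [pvPyRange, List.range_eq_range'] using this
    rw [hrows]
    have hset : (pre ++ initRow :: List.replicate cnt initRow).set (pre.length : Int).toNat
        (pvFlat data width.toNat s) =
        (pre ++ [pvFlat data width.toNat s]) ++ List.replicate cnt initRow := by
      simp
    rw [hset]
    have hlen : (pre ++ [pvFlat data width.toNat s]).length = pre.length + 1 := by simp
    rw [← hlen, ih]
    simp [pvChunk, pvIterC]

lemma pvA_eq_chunk (data : List Int) (height width : Int) :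
    decode_RGB data height width = pvChunk data width.toNat height.toNat
      ([0, 0, 0], List.replicate 64 ([0, 0, 0] : List Int), 0, 0) := by
  unfold decode_RGB
  dsimp only
  have h0 : (PySem.List.pyRange 0 height).map
      (fun _ => (PySem.List.pyRange 0 width).map (fun _ => ([0, 0, 0] : List Int))) =
      List.replicate height.toNat ((PySem.List.pyRange 0 width).map (fun _ => ([0, 0, 0] : List Int))) := by
    rw [List.map_const', pvPyRange]
    simp
  rw [h0, pvPyRange height, List.range_eq_range']
  have := pvOuter_fill data width height.toNat []
    (([0, 0, 0] : List Int), List.replicate 64 ([0, 0, 0] : List Int), (0 : Int), (0 : Int))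
  simp only [List.length_nil, List.nil_append] at this
  rw [this]

lemma pvFlat_add (data : List Int) (a b : Nat) :
    ∀ st, pvFlat data (a + b) st = pvFlat data a st ++ pvFlat data b (pvIter data a st) := by
  induction a with
  | zero => intro st; simp [pvFlat, pvIter]
  | succ a ih =>
    intro st
    have h : a + 1 + b = (a + b) + 1 := by omega
    rw [h]
    simp only [pvFlat, pvIter, ih]
    simp

lemma pvFlat_run (data : List Int) :
    ∀ (m : Nat) (rl : Int) (prev : List Int) (running : List (List Int)) (bi : Int), 0 ≤ rl →
    running.set (PySem.Int.mod (prev.getD 2 0 * 3 + prev.getD 1 0 * 5 + prev.getD 0 0 * 7 + 255 * 11) 64).toNat prev = running →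
    pvFlat data m (prev, running, bi, rl) =
      List.replicate (min rl.toNat m) prev ++ pvFlat data (m - rl.toNat) (prev, running, bi, 0) := by
  intro m
  induction m with
  | zero => intro rl prev running bi h0 hidem; simp [pvFlat]
  | succ m ih =>
    intro rl prev running bi h0 hidem
    by_cases hpos : 0 < rl
    · have hstep : pvStep data (prev, running, bi, rl) = (prev, (prev, running, bi, rl - 1)) := by
        simp only [pvStep]
        rw [if_pos hpos]
        rw [hidem]
      simp only [pvFlat, hstep]
      rw [ih (rl - 1) prev running bi (by omega) hidem]
      have e1 : min rl.toNat (m + 1) = min (rl - 1).toNat m + 1 := by omega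
      have e2 : (m + 1) - rl.toNat = m - (rl - 1).toNat := by omega
      rw [e1, e2, List.replicate_succ]
      simp
    · have : rl = 0 := by omega
      subst this
      simp [pvFlat]

-- the triple-to-list view connecting B's pixels with A's
def pvToL (p : Int × Int × Int) : List Int := [p.1, p.2.1, p.2.2]

lemma pvMain (data : List Int) :
    ∀ (fuel n p : Nat) (i : Int) (prevT : Int × Int × Int) (cacheT : List (Int × Int × Int)),
    n - p ≤ fuel → cacheT.length = 64 →
    ((pvEval (pvTok data fuel n p i) prevT cacheT).take (n - p)).map pvToL =
      pvFlat data (n - p) (pvToL prevT, cacheT.map pvToL, i, 0) := by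
  intro fuel
  induction fuel with
  | zero =>
    intro n p i prevT cacheT hf hc
    have h0 : n - p = 0 := by omega
    rw [h0]
    simp [pvFlat, pvTok, pvEval]
  | succ fuel ih =>
    intro n p i prevT cacheT hf hc
    by_cases hp : p < n
    · have e : n - p = (n - (p + 1)) + 1 := by omega
      rw [pvTok, if_pos hp]
      dsimp only
      by_cases h254 : PySem.List.pyGetD data i 0 = 254
      · -- Unique (rgb) chunk
        rw [if_pos h254]
        set px : Int × Int × Int := (PySem.List.pyGetD data (i + 3) 0,
          PySem.List.pyGetD data (i + 2) 0, PySem.List.pyGetD data (i + 1) 0) with hpx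
        have heval : pvEval (PvOp.rgb px.1 px.2.1 px.2.2 :: pvTok data fuel n (p + 1) (i + 4)) prevT cacheT =
            px :: pvEval (pvTok data fuel n (p + 1) (i + 4)) px (cacheT.set (pvCHash px) px) := by
          simp [pvEval, pvPx, pvEmit]
        rw [heval, e, List.take_succ_cons, List.map_cons,
          ih n (p + 1) (i + 4) px _ (by omega) (by simp [hc])]
        conv_rhs => rw [pvFlat]
        have hstep : pvStep data (pvToL prevT, cacheT.map pvToL, i, 0) =
            (pvToL px, (pvToL px, (cacheT.set (pvCHash px) px).map pvToL, i + 4, 0)) := by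
          simp only [pvStep]
          rw [if_neg (by norm_num), if_pos h254]
          simp [pvToL, pvCHash, List.map_set, hpx]
        rw [hstep]
      · rw [if_neg h254]
        rcases pvBand192 (PySem.List.pyGetD data i 0) with htag | htag | htag | htag
        · -- Index chunk
          rw [if_pos htag]
          set k := (PySem.Int.band (PySem.List.pyGetD data i 0) 63).toNat with hk
          set px : Int × Int × Int := cacheT.getD k (0, 0, 0) with hpx
          have heval : pvEval (PvOp.idx k :: pvTok data fuel n (p + 1) (i + 1)) prevT cacheT =
              px :: pvEval (pvTok data fuel n (p + 1) (i + 1)) px cacheT := by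
            simp [pvEval, hpx, List.getD_eq_getElem?_getD]
          rw [heval, e, List.take_succ_cons, List.map_cons,
            ih n (p + 1) (i + 1) px _ (by omega) hc]
          conv_rhs => rw [pvFlat]
          have hkl : k < cacheT.length := by rw [hc]; exact pvBand63_lt _
          have hget : pvToL px = (cacheT.map pvToL).getD k [] := by
            rw [hpx, List.getD_eq_getElem?_getD, List.getD_eq_getElem?_getD,
              List.getElem?_eq_getElem hkl, List.getElem?_eq_getElem (by simpa using hkl)]
            simp
          have hstep : pvStep data (pvToL prevT, cacheT.map pvToL, i, 0) =
              (pvToL px, (pvToL px, cacheT.map pvToL, i + 1, 0)) := by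
            simp only [pvStep]
            rw [if_neg (by norm_num), if_neg h254, if_pos htag, hget, hk]
          rw [hstep]
        · -- Diff chunk
          have hne0 : ¬PySem.Int.band (PySem.List.pyGetD data i 0) 192 = 0 := by omega
          rw [if_neg hne0, if_pos htag]
          set b0 := PySem.List.pyGetD data i 0 with hb0
          set px : Int × Int × Int := (prevT.1 + (PySem.Int.band b0 3 - 2),
            prevT.2.1 + (PySem.Int.band (b0 >>> (2 : Nat)) 3 - 2),
            prevT.2.2 + (PySem.Int.band (b0 >>> (4 : Nat)) 3 - 2)) with hpx
          have heval : pvEval (PvOp.diff (PySem.Int.band b0 3 - 2)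
              (PySem.Int.band (b0 >>> (2 : Nat)) 3 - 2) (PySem.Int.band (b0 >>> (4 : Nat)) 3 - 2) ::
                pvTok data fuel n (p + 1) (i + 1)) prevT cacheT =
              px :: pvEval (pvTok data fuel n (p + 1) (i + 1)) px (cacheT.set (pvCHash px) px) := by
            simp [pvEval, pvPx, pvEmit, hpx]
          rw [heval, e, List.take_succ_cons, List.map_cons,
            ih n (p + 1) (i + 1) px _ (by omega) (by simp [hc])]
          conv_rhs => rw [pvFlat]
          have hstep : pvStep data (pvToL prevT, cacheT.map pvToL, i, 0) =
              (pvToL px, (pvToL px, (cacheT.set (pvCHash px) px).map pvToL, i + 1, 0)) := by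
            simp only [pvStep]
            rw [if_neg (show ¬((0:Int) < 0) by norm_num), if_neg h254, if_neg hne0, if_pos htag]
            have h1 : (pvToL prevT).getD 0 0 + PySem.Int.band (b0 >>> (0 : Nat)) 3 - 2 = px.1 := by
              simp [pvToL, hpx]; ring
            have h2 : (pvToL prevT).getD 1 0 + PySem.Int.band (b0 >>> (2 : Nat)) 3 - 2 = px.2.1 := by
              simp [pvToL, hpx]; ring
            have h3 : (pvToL prevT).getD 2 0 + PySem.Int.band (b0 >>> (4 : Nat)) 3 - 2 = px.2.2 := by
              simp [pvToL, hpx]; ring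
            rw [h1, h2, h3]
            simp [pvToL, pvCHash, List.map_set]
          rw [hstep]
        · -- Luma chunk
          have hne0 : ¬PySem.Int.band (PySem.List.pyGetD data i 0) 192 = 0 := by omega
          have hne64 : ¬PySem.Int.band (PySem.List.pyGetD data i 0) 192 = 64 := by omega
          rw [if_neg hne0, if_neg hne64, if_pos htag]
          set b0 := PySem.List.pyGetD data i 0 with hb0
          set b1 := PySem.List.pyGetD data (i + 1) 0 with hb1
          set dg := PySem.Int.band b0 63 - 32 with hdg
          set drdg := PySem.Int.band (b1 >>> (4 : Nat)) 15 - 8 with hdrdg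
          set dbdg := PySem.Int.band b1 15 - 8 with hdbdg
          set px : Int × Int × Int := (PySem.Int.band (prevT.1 + dbdg + dg) 255,
            PySem.Int.band (prevT.2.1 + dg) 255, PySem.Int.band (prevT.2.2 + drdg + dg) 255) with hpx
          have heval : pvEval (PvOp.luma dg drdg dbdg :: pvTok data fuel n (p + 1) (i + 2)) prevT cacheT =
              px :: pvEval (pvTok data fuel n (p + 1) (i + 2)) px (cacheT.set (pvCHash px) px) := by
            simp [pvEval, pvPx, pvEmit, hpx]
          rw [heval, e, List.take_succ_cons, List.map_cons,
            ih n (p + 1) (i + 2) px _ (by omega) (by simp [hc])]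
          conv_rhs => rw [pvFlat]
          have hstep : pvStep data (pvToL prevT, cacheT.map pvToL, i, 0) =
              (pvToL px, (pvToL px, (cacheT.set (pvCHash px) px).map pvToL, i + 2, 0)) := by
            simp only [pvStep]
            rw [if_neg (show ¬((0:Int) < 0) by norm_num), if_neg h254, if_neg hne0, if_neg hne64,
              if_pos htag]
            have h1 : PySem.Int.band ((pvToL prevT).getD 0 0 +
                ((PySem.Int.band (b1 >>> (0 : Nat)) 15 - 8) + dg)) 255 = px.1 := by
              simp [pvToL, hpx, hdbdg]
              congr 1
              ring
            have h2 : PySem.Int.band ((pvToL prevT).getD 1 0 + dg) 255 = px.2.1 := by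
              simp [pvToL, hpx]
            have h3 : PySem.Int.band ((pvToL prevT).getD 2 0 + (drdg + dg)) 255 = px.2.2 := by
              simp [pvToL, hpx]
              congr 1
              ring
            rw [h1, h2, h3]
            have e12 : i + 1 + 1 = i + 2 := by ring
            simp [pvToL, pvCHash, List.map_set, e12]
          rw [hstep]
        · -- Run chunk
          have hne0 : ¬PySem.Int.band (PySem.List.pyGetD data i 0) 192 = 0 := by omega
          have hne64 : ¬PySem.Int.band (PySem.List.pyGetD data i 0) 192 = 64 := by omega
          have hne128 : ¬PySem.Int.band (PySem.List.pyGetD data i 0) 192 = 128 := by omega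
          rw [if_neg hne0, if_neg hne64, if_neg hne128]
          set b0 := PySem.List.pyGetD data i 0 with hb0
          set cnt := (PySem.Int.band b0 63).toNat + 1 with hcnt
          have heval : pvEval (PvOp.run cnt :: pvTok data fuel n (p + cnt) (i + 1)) prevT cacheT =
              List.replicate cnt prevT ++
                pvEval (pvTok data fuel n (p + cnt) (i + 1)) prevT (cacheT.set (pvCHash prevT) prevT) := by
            simp [pvEval, pvPx, pvEmit]
          rw [heval, List.take_append, List.take_replicate, List.map_append, List.map_replicate,
            List.length_replicate]
          have hsub : n - p - cnt = n - (p + cnt) := by omega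
          rw [hsub, ih n (p + cnt) (i + 1) prevT _ (by omega) (by simp [hc])]
          rw [e]
          conv_rhs => rw [pvFlat]
          have hstep : pvStep data (pvToL prevT, cacheT.map pvToL, i, 0) =
              (pvToL prevT, (pvToL prevT, (cacheT.set (pvCHash prevT) prevT).map pvToL, i + 1,
                PySem.Int.band b0 63)) := by
            simp only [pvStep]
            rw [if_neg (show ¬((0:Int) < 0) by norm_num), if_neg h254, if_neg hne0, if_neg hne64,
              if_neg hne128]
            simp [pvToL, pvCHash, List.map_set]
            rw [hb0]
          rw [hstep]
          have hCH : ((cacheT.set (pvCHash prevT) prevT).map pvToL).set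
              (PySem.Int.mod ((pvToL prevT).getD 2 0 * 3 + (pvToL prevT).getD 1 0 * 5 +
                (pvToL prevT).getD 0 0 * 7 + 255 * 11) 64).toNat (pvToL prevT) =
              (cacheT.set (pvCHash prevT) prevT).map pvToL := by
            simp [pvToL, pvCHash, List.map_set, List.set_set]
          rw [pvFlat_run data (n - (p + 1)) (PySem.Int.band b0 63) (pvToL prevT) _ (i + 1)
            (by rw [PySem.Int.band_comm]; exact PySem.Int.band_nonneg_of_nonneg_left _ (by norm_num))
            hCH]
          have hrl : (PySem.Int.band b0 63).toNat = cnt - 1 := by omega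
          rw [hrl]
          have e1 : min (n - (p + 1) + 1) cnt = min (cnt - 1) (n - (p + 1)) + 1 := by omega
          have e2 : n - (p + cnt) = n - (p + 1) - (cnt - 1) := by omega
          rw [e1, e2, List.replicate_succ]
          simp
    · have h0 : n - p = 0 := by omega
      rw [h0]
      simp [pvFlat]

lemma pvChunk_zeroW (data : List Int) : ∀ (c : Nat) (s : List Int × List (List Int) × Int × Int),
    pvChunk data 0 c s = List.replicate c [] := by
  intro c
  induction c with
  | zero => intro s; rfl
  | succ c ih => intro s; simp [pvChunk, pvFlat, pvIter, ih, List.replicate_succ]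

lemma pvChunk_slices (data : List Int) (W : Nat) :
    ∀ (c : Nat) (s : List Int × List (List Int) × Int × Int),
    (List.range c).map (fun (k : Nat) => ((pvFlat data (c * W) s).drop (k * W)).take W) =
      pvChunk data W c s := by
  intro c
  induction c with
  | zero => intro s; rfl
  | succ c ih =>
    intro s
    rw [List.range_succ_eq_map]
    simp only [List.map_cons, List.map_map]
    have hsplit : (c + 1) * W = W + c * W := by ring
    rw [hsplit, pvFlat_add]
    have hhead : (((pvFlat data W s ++ pvFlat data (c * W) (pvIter data W s)).drop (0 * W)).take W) =
        pvFlat data W s := by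
      rw [Nat.zero_mul, List.drop_zero]
      exact List.take_left' (pvFlat_length data W s)
    rw [hhead]
    have htail : ∀ (k : Nat),
        (((pvFlat data W s ++ pvFlat data (c * W) (pvIter data W s)).drop (k.succ * W)).take W) =
        (((pvFlat data (c * W) (pvIter data W s)).drop (k * W)).take W) := by
      intro k
      rw [List.drop_append]
      have h1 : (pvFlat data W s).drop (k.succ * W) = [] := by
        apply List.drop_eq_nil_of_le
        rw [pvFlat_length]
        calc W = 1 * W := by ring
        _ ≤ k.succ * W := Nat.mul_le_mul_right W (by omega)
      have h2 : k.succ * W - (pvFlat data W s).length = k * W := by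
        rw [pvFlat_length, Nat.succ_mul]
        omega
      rw [h1, h2, List.nil_append]
    have hmap : List.map ((fun (k : Nat) => ((pvFlat data W s ++ pvFlat data (c * W) (pvIter data W s)).drop (k * W)).take W) ∘ Nat.succ) (List.range c)
        = pvChunk data W c (pvIter data W s) := by
      simp only [Function.comp_def]
      rw [List.map_congr_left (fun k _ => htail k)]
      exact ih _
    rw [hmap]
    rfl

lemma pvSliceNil {α : Type} (a b : Int) : PySem.List.slice ([] : List α) (some a) (some b) = [] := by
  simp [PySem.List.slice]

lemma pvB_eq_chunk (data : List Int) (height width : Int) :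
    decode_RGB_alt data height width = pvChunk data width.toNat height.toNat
      ([0, 0, 0], List.replicate 64 ([0, 0, 0] : List Int), 0, 0) := by
  unfold decode_RGB_alt
  dsimp only
  have hL : (fun p : Int × Int × Int => [p.1, p.2.1, p.2.2]) = pvToL := rfl
  rw [hL]
  set n := height.toNat * width.toNat with hn
  set flat := (pvEval (pvTok data n n 0 0) (0, 0, 0)
    (List.replicate 64 ((0, 0, 0) : Int × Int × Int))).take n with hflatdef
  have hflat : flat.map pvToL =
      pvFlat data n ([0, 0, 0], List.replicate 64 ([0, 0, 0] : List Int), 0, 0) := by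
    have := pvMain data n n 0 0 (0, 0, 0) (List.replicate 64 ((0, 0, 0) : Int × Int × Int))
      (by omega) (by simp)
    rw [Nat.sub_zero, List.map_replicate] at this
    exact this
  rw [pvPyRange, List.map_map]
  by_cases hw : 0 ≤ width
  · have hcast : ∀ (k : Nat),
        (PySem.List.slice flat (some ((k : Int) * width)) (some (((k : Int) + 1) * width))).map pvToL =
        ((pvFlat data n ([0, 0, 0], List.replicate 64 ([0, 0, 0] : List Int), 0, 0)).drop
          (k * width.toNat)).take width.toNat := by
      intro k
      have h1 : (k : Int) * width = ((k * width.toNat : Nat) : Int) := by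
        push_cast [Int.toNat_of_nonneg hw]; ring
      have h2 : ((k : Int) + 1) * width = (((k + 1) * width.toNat : Nat) : Int) := by
        push_cast [Int.toNat_of_nonneg hw]; ring
      rw [h1, h2, PySem.List.slice_natCast]
      have h3 : (k + 1) * width.toNat - k * width.toNat = width.toNat := by
        calc (k + 1) * width.toNat - k * width.toNat = k * width.toNat + width.toNat - k * width.toNat := by ring_nf
        _ = width.toNat := by omega
      rw [h3, List.map_take, List.map_drop, hflat]
    calc List.map (fun (k : Nat) => (PySem.List.slice flat (some ((k : Int) * width))
          (some (((k : Int) + 1) * width))).map pvToL) (List.range height.toNat)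
        = List.map (fun (k : Nat) => ((pvFlat data n ([0, 0, 0], List.replicate 64 ([0, 0, 0] : List Int), 0, 0)).drop (k * width.toNat)).take width.toNat) (List.range height.toNat) := by
          apply List.map_congr_left; intro k _; exact hcast k
      _ = pvChunk data width.toNat height.toNat _ := by
          rw [hn]; exact pvChunk_slices data width.toNat height.toNat _
  · have hW : width.toNat = 0 := by omega
    have hn0 : n = 0 := by rw [hn, hW]; ring
    have hflat0 : flat = [] := by rw [hflatdef, hn0]; simp
    rw [hW, pvChunk_zeroW, hflat0]
    simp [pvSliceNil, Function.comp_def, List.map_const']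

-- ===== VERDICT (by name: the statement is the Claim_ definition above) =====
theorem decode_RGB_spec : Claim_equal_decode_RGB := by
  intro data height width _ _
  unfold Spec_decode_RGB
  rw [pvA_eq_chunk, pvB_eq_chunk]
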